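-- pv_equiv track=rewrite | github.com/romilimtiaz/ResNet-50-for-GI-Events | build_pred_json_seq.py | segments_from_labels
-- ===== SOURCE A (Python) =====
-- from typing import Dict, List, Tuple
--
-- def segments_from_labels(labels: List[int]) -> List[Tuple[int, int, int]]:
--     segments = []
--     if not labels:
--         return segments
--     start = 0
--     current = labels[0]
--     for i in range(1, len(labels)):
--         if labels[i] != current:
--             segments.append((start, i - 1, current))
--             start = i
--             current = labels[i]
--     segments.append((start, len(labels) - 1, current))
--     return segments
-- ===== SOURCE B (Python) =====
-- from typing import List, Tuple
--
-- def segments_from_labels(labels: List[int]) -> List[Tuple[int, int, int]]: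
--     n = len(labels)
--     starts = [i for i in range(n) if i == 0 or labels[i] != labels[i - 1]]
--     ends = starts[1:] + [n]
--     return [(s, e - 1, labels[s]) for s, e in zip(starts, ends)]
-- ===== Notes on version B (the rewrite author's own statement) =====
-- stated objective: alternative
-- what changed: Replaces A's single-pass accumulator loop with two staged passes: first collect the list of run-start indices into an index array, then pair consecutive starts (zip with the shifted list) to emit the segments.
import Mathlib
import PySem

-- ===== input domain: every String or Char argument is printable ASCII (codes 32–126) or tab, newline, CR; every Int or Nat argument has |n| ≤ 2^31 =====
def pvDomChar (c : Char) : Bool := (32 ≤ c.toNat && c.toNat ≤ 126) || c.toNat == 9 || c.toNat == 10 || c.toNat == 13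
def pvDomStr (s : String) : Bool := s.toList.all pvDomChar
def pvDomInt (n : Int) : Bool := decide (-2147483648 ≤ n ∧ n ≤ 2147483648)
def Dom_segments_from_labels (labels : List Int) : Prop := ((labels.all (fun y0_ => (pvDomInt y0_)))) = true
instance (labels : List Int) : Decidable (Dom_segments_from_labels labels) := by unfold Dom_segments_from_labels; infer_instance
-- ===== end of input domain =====

-- B replaces A's single-pass accumulator loop by two staged passes (collect run-start indices,
-- then zip consecutive starts): an alternative decomposition of the same O(n) task.


-- ===== PORT A =====
-- literal transliteration of A: early return on [], then an index loop over range(1, len)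
-- maintaining (segments, start, current), with a final append of the last segment.
def segments_from_labels (labels : List Int) : List (Int × Int × Int) :=
  let segments : List (Int × Int × Int) := []
  if labels = [] then segments
  else
    let start : Int := 0
    let current : Int := PySem.List.pyGetD labels 0 0
    let st := (PySem.List.pyRange 1 (labels.length : Int) 1).foldl
      (fun st i =>
        if PySem.List.pyGetD labels i 0 ≠ st.2.2 then
          (st.1 ++ [(st.2.1, i - 1, st.2.2)], i, PySem.List.pyGetD labels i 0)
        else st)
      (segments, start, current)
    st.1 ++ [(st.2.1, (labels.length : Int) - 1, st.2.2)]

-- ===== PORT B =====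
-- transliteration of Source B: pass 1 builds starts = [i for i in range(n) if i == 0 or labels[i] != labels[i-1]],
-- pass 2 shifts it (ends = starts[1:] + [n]) and zips, emitting (s, e - 1, labels[s]) per pair.
def segments_from_labels_alt (labels : List Int) : List (Int × Int × Int) :=
  let n : Int := labels.length
  let starts : List Int := (PySem.List.pyRange 0 n 1).filter
    (fun i => i == 0 || PySem.List.pyGetD labels i 0 != PySem.List.pyGetD labels (i - 1) 0)
  let ends : List Int := starts.drop 1 ++ [n]
  (starts.zip ends).map (fun se => (se.1, se.2 - 1, PySem.List.pyGetD labels se.1 0))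

-- ===== PRECONDITION & SPEC =====
def Spec_segments_from_labels (labels : List Int) (out : List (Int × Int × Int)) : Prop := out = segments_from_labels_alt labels
instance (labels : List Int) (out : List (Int × Int × Int)) : Decidable (Spec_segments_from_labels labels out) := by unfold Spec_segments_from_labels; infer_instance

-- ===== CLAIM (what is proved, stated in full; the proofs are below) =====
def Claim_equal_segments_from_labels : Prop := ∀ (labels : List Int), Dom_segments_from_labels labels → Spec_segments_from_labels labels (segments_from_labels labels)

-- ===== LEMMAS AND PROOFS =====

-- run-by-run canonical form both ports are reduced to
def segmentsGroups (xs : List Int) (idx : Int) : List (Int × Int × Int) :=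
  match xs with
  | [] => []
  | v :: rest =>
    let length : Int := 1 + (rest.takeWhile (· == v)).length
    (idx, idx + length - 1, v) :: segmentsGroups (rest.dropWhile (· == v)) (idx + length)
termination_by xs.length
decreasing_by
  simp only [List.length_cons]
  exact Nat.lt_succ_of_le (List.length_dropWhile_le _ _)

-- A's loop, rewritten as structural recursion over the suffix of labels still to scan,
-- carrying the running index i and the loop state (segments, start, current).
def loopA (xs : List Int) (i : Int) (st : List (Int × Int × Int) × Int × Int) :
    List (Int × Int × Int) × Int × Int :=
  match xs with
  | [] => st
  | x :: rest =>
    if x ≠ st.2.2 then loopA rest (i + 1) (st.1 ++ [(st.2.1, i - 1, st.2.2)], i, x)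
    else loopA rest (i + 1) st

-- A's foldl over range(k, len) equals loopA on the suffix labels.drop k.
lemma foldl_eq_loopA (labels : List Int) :
    ∀ (suffix : List Int) (k : Nat) (st : List (Int × Int × Int) × Int × Int),
      labels.drop k = suffix →
      (PySem.List.pyRange (k : Int) (labels.length : Int) 1).foldl
        (fun st i =>
          if PySem.List.pyGetD labels i 0 ≠ st.2.2 then
            (st.1 ++ [(st.2.1, i - 1, st.2.2)], i, PySem.List.pyGetD labels i 0)
          else st) st
      = loopA suffix (k : Int) st := by
  intro suffix
  induction suffix with
  | nil =>
    intro k st h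
    have hk : labels.length ≤ k := by
      have := List.drop_eq_nil_iff.mp h
      omega
    rw [PySem.List.pyRange_one_eq_nil (by exact_mod_cast hk)]
    rfl
  | cons x rest ih =>
    intro k st h
    have hk : k < labels.length := by
      by_contra hle
      rw [List.drop_eq_nil_of_le (by omega)] at h
      exact List.cons_ne_nil x rest h.symm
    have hcd := List.getElem_cons_drop (as := labels) (i := k) hk
    rw [h] at hcd
    obtain ⟨hget, hdrop⟩ := List.cons_eq_cons.mp hcd
    have hgd : PySem.List.pyGetD labels (k : Int) 0 = x := by
      rw [PySem.List.pyGetD_natCast, List.getD_eq_getElem labels 0 hk, hget]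
    rw [PySem.List.pyRange_one_cons (by exact_mod_cast hk), List.foldl_cons]
    have hc : ((k : Int) + 1) = (((k + 1 : Nat)) : Int) := by push_cast; ring
    rw [hc, ih (k + 1) _ hdrop]
    conv_rhs => rw [loopA]
    simp only [hgd, ← hc]
    split_ifs <;> rfl

-- the loop state fed through the final append equals the pending-group emission.
lemma loopA_finalize :
    ∀ (xs : List Int) (i start cur : Int) (segs : List (Int × Int × Int)),
      (loopA xs i (segs, start, cur)).1 ++
        [((loopA xs i (segs, start, cur)).2.1, i + xs.length - 1,
          (loopA xs i (segs, start, cur)).2.2)]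
      = segs ++ (start, i + (xs.takeWhile (· == cur)).length - 1, cur) ::
          segmentsGroups (xs.dropWhile (· == cur)) (i + (xs.takeWhile (· == cur)).length) := by
  intro xs
  induction xs with
  | nil =>
    intro i start cur segs
    simp [loopA, segmentsGroups]
  | cons x rest ih =>
    intro i start cur segs
    by_cases hx : x = cur
    · subst hx
      rw [loopA, if_neg (by simp)]
      have hih := ih (i + 1) start x segs
      rw [List.takeWhile_cons_of_pos (by simp), List.dropWhile_cons_of_pos (by simp)]
      simp only [List.length_cons]
      push_cast at hih ⊢
      rw [show i + ((rest.length : Int) + 1) - 1 = i + 1 + (rest.length : Int) - 1 by ring,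
          show i + (((rest.takeWhile (· == x)).length : Int) + 1) - 1
             = i + 1 + ((rest.takeWhile (· == x)).length : Int) - 1 by ring,
          show i + (((rest.takeWhile (· == x)).length : Int) + 1)
             = i + 1 + ((rest.takeWhile (· == x)).length : Int) by ring]
      exact hih
    · rw [loopA, if_pos (by simpa using hx)]
      have hih := ih (i + 1) i x (segs ++ [(start, i - 1, cur)])
      rw [List.takeWhile_cons_of_neg (by simpa using hx),
          List.dropWhile_cons_of_neg (by simpa using hx)]
      simp only [List.length_cons]
      push_cast at hih ⊢
      rw [show i + ((rest.length : Int) + 1) - 1 = i + 1 + (rest.length : Int) - 1 by ring, hih]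
      rw [segmentsGroups]
      simp only [List.append_assoc, List.cons_append, List.nil_append, List.length_nil]
      norm_num
      constructor
      · ring
      · congr 1
        ring

-- A's port equals the canonical run-by-run form.
lemma A_eq_groups (labels : List Int) :
    segments_from_labels labels = segmentsGroups labels 0 := by
  unfold segments_from_labels
  cases labels with
  | nil => simp [segmentsGroups]
  | cons x rest =>
    simp only [if_neg (List.cons_ne_nil x rest)]
    rw [show (PySem.List.pyRange 1 (((x :: rest).length : Nat) : Int) 1)
          = PySem.List.pyRange (((1 : Nat) : Int)) (((x :: rest).length : Nat) : Int) 1 by norm_num]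
    rw [foldl_eq_loopA (x :: rest) rest 1 ([], 0, PySem.List.pyGetD (x :: rest) 0 0) rfl]
    rw [PySem.List.pyGetD_zero_cons]
    rw [show (((x :: rest).length : Nat) : Int) - 1 = (((1 : Nat) : Int)) + (rest.length : Int) - 1 by
          simp only [List.length_cons]; push_cast; ring]
    rw [loopA_finalize rest (((1 : Nat) : Int)) 0 x []]
    conv_rhs => rw [segmentsGroups]
    simp only [List.nil_append]
    norm_num

-- B's passes in Nat-indexed canonical form
def startsN (xs : List Int) : List Nat :=
  (List.range xs.length).filter (fun i => i == 0 || xs.getD i 0 != xs.getD (i - 1) 0)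

def segsOf (xs : List Int) : List (Int × Int × Int) :=
  ((startsN xs).zip ((startsN xs).drop 1 ++ [xs.length])).map
    (fun se => ((se.1 : Int), (se.2 : Int) - 1, xs.getD se.1 0))

-- B's port equals the Nat-indexed form (pyRange/pyGetD pushed to List.range/getD).
lemma alt_eq_segsOf (labels : List Int) :
    segments_from_labels_alt labels = segsOf labels := by
  simp only [segments_from_labels_alt, segsOf]
  rw [PySem.List.pyRange_zero_natCast, List.filter_map]
  have hpred : ∀ i : Nat,
      (fun j : Int => j == 0 || PySem.List.pyGetD labels j 0 != PySem.List.pyGetD labels (j - 1) 0)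
        ((i : Nat) : Int)
      = (fun i : Nat => i == 0 || labels.getD i 0 != labels.getD (i - 1) 0) i := by
    intro i
    cases i with
    | zero => simp
    | succ m =>
      simp only [PySem.List.pyGetD_natCast]
      have h1 : ((m + 1 : Nat) : Int) - 1 = ((m : Nat) : Int) := by push_cast; ring
      rw [h1, PySem.List.pyGetD_natCast]
      simp
      exact fun h => absurd h (by omega)
  have hflt : List.filter
      ((fun i => i == 0 || PySem.List.pyGetD labels i 0 != PySem.List.pyGetD labels (i - 1) 0)
        ∘ fun k : Nat => (k : Int)) (List.range labels.length) = startsN labels := by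
    unfold startsN
    exact List.filter_congr (fun i _ => hpred i)
  rw [hflt]
  rw [← List.map_drop, show ([(labels.length : Int)]) = [labels.length].map (fun k : Nat => (k : Int)) from rfl,
      ← List.map_append, List.zip_map, List.map_map]
  congr 1
  funext se
  simp [Prod.map, PySem.List.pyGetD_natCast]

-- elements with index ≤ run length are the run's value
lemma getD_run (y : Int) (ys : List Int) (i : Nat)
    (hi : i ≤ (ys.takeWhile (· == y)).length) :
    (y :: ys).getD i 0 = y := by
  cases i with
  | zero => exact List.getD_cons_zero
  | succ m =>
    have hm : m < (ys.takeWhile (· == y)).length := by omega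
    rw [List.getD_cons_succ]
    conv_lhs => rw [← List.takeWhile_append_dropWhile (p := (· == y)) (l := ys)]
    rw [List.getD_append _ _ _ _ hm, List.getD_eq_getElem _ _ hm]
    have := List.mem_takeWhile_imp (List.getElem_mem hm)
    simpa using this

-- getD beyond the run reads the dropped suffix (both sides defaulting to 0 past the end)
lemma getD_past_run (y : Int) (ys : List Int) (j : Nat) :
    (y :: ys).getD ((ys.takeWhile (· == y)).length + 1 + j) 0
      = (ys.dropWhile (· == y)).getD j 0 := by
  have h := List.takeWhile_append_dropWhile (p := (· == y)) (l := ys)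
  set a := ys.takeWhile (· == y) with hA
  set b := ys.dropWhile (· == y) with hB
  rw [show a.length + 1 + j = (a.length + j) + 1 by omega, List.getD_cons_succ, ← h,
      List.getD_append_right _ _ _ _ (by omega)]
  congr 1
  omega

-- pass 1 splits run by run
lemma startsN_cons (y : Int) (ys : List Int) :
    startsN (y :: ys)
      = 0 :: (startsN (ys.dropWhile (· == y))).map (· + ((ys.takeWhile (· == y)).length + 1)) := by
  set t := (ys.takeWhile (· == y)).length with ht
  set s := ys.dropWhile (· == y) with hs
  have hys : t + s.length = ys.length := by
    conv_rhs => rw [← List.takeWhile_append_dropWhile (p := (· == y)) (l := ys)]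
    rw [List.length_append, ht, hs]
  have hlen : (y :: ys).length = (t + 1) + s.length := by
    simp only [List.length_cons]
    omega
  unfold startsN
  rw [hlen, List.range_add, List.filter_append, List.filter_map]
  have h1 : (List.range (t + 1)).filter
      (fun i => i == 0 || (y :: ys).getD i 0 != (y :: ys).getD (i - 1) 0) = [0] := by
    have : ∀ i ∈ List.range (t + 1),
        (i == 0 || (y :: ys).getD i 0 != (y :: ys).getD (i - 1) 0) = (i == 0) := by
      intro i hi
      rw [List.mem_range] at hi
      cases i with
      | zero => simp
      | succ m =>
        have e1 : (y :: ys).getD (m + 1) 0 = y := getD_run y ys (m + 1) (by omega)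
        have e2 : (y :: ys).getD (m + 1 - 1) 0 = y := getD_run y ys m (by omega)
        rw [e1, e2]
        simp
    rw [List.filter_congr this]
    have hr : List.range (t + 1) = 0 :: (List.range t).map (fun x => 1 + x) := by
      rw [show t + 1 = 1 + t by omega, List.range_add]
      rfl
    rw [hr, List.filter_cons_of_pos (by simp), List.filter_map]
    simp [Function.comp]
  have h2 : (List.range s.length).filter
      ((fun i => i == 0 || (y :: ys).getD i 0 != (y :: ys).getD (i - 1) 0) ∘ (fun x => t + 1 + x))
      = (List.range s.length).filter (fun i => i == 0 || s.getD i 0 != s.getD (i - 1) 0) := by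
    apply List.filter_congr
    intro j hj
    rw [List.mem_range] at hj
    simp only [Function.comp]
    cases j with
    | zero =>
      have e1 : (y :: ys).getD (t + 1 + 0) 0 = s.getD 0 0 := getD_past_run y ys 0
      have e2 : (y :: ys).getD (t + 1 + 0 - 1) 0 = y := getD_run y ys t (le_refl t)
      have hne : s.getD 0 0 ≠ y := by
        have h0 := List.head?_dropWhile_not (· == y) ys
        rw [← hs] at h0
        cases hsv : s with
        | nil => rw [hsv] at hj; simp at hj
        | cons a l =>
          rw [hsv] at h0
          simp at h0 ⊢
          exact h0
      rw [e1, e2]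
      have hne' : ¬ s[0]?.getD 0 = y := by
        rw [← List.getD_eq_getElem?_getD]; exact hne
      simp [hne']
    | succ m =>
      have e1 : (y :: ys).getD (t + 1 + (m + 1)) 0 = s.getD (m + 1) 0 := getD_past_run y ys (m + 1)
      have e2 : (y :: ys).getD (t + 1 + (m + 1) - 1) 0 = s.getD m 0 := by
        rw [show t + 1 + (m + 1) - 1 = t + 1 + m by omega]
        exact getD_past_run y ys m
      rw [e1, e2]
      simp
  rw [h1, h2]
  simp only [List.singleton_append]
  congr 1
  apply List.map_congr_left
  intro a _
  omega

-- pass 2 splits run by run accordingly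
lemma segsOf_cons (y : Int) (ys : List Int) :
    segsOf (y :: ys)
      = (0, ((ys.takeWhile (· == y)).length : Int), y) ::
          (segsOf (ys.dropWhile (· == y))).map
            (fun z => (z.1 + (((ys.takeWhile (· == y)).length : Int) + 1),
                       z.2.1 + (((ys.takeWhile (· == y)).length : Int) + 1), z.2.2)) := by
  set t := (ys.takeWhile (· == y)).length with ht
  set s := ys.dropWhile (· == y) with hs
  have hys : t + s.length = ys.length := by
    conv_rhs => rw [← List.takeWhile_append_dropWhile (p := (· == y)) (l := ys)]
    rw [List.length_append, ht, hs]
  have hlen : (y :: ys).length = (t + 1) + s.length := by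
    simp only [List.length_cons]
    omega
  have hval : ∀ j : Nat, (y :: ys).getD (j + (t + 1)) 0 = s.getD j 0 := by
    intro j
    rw [show j + (t + 1) = t + 1 + j by omega]
    exact getD_past_run y ys j
  cases hcase : s with
  | nil =>
    unfold segsOf
    rw [startsN_cons, ← ht, ← hs, hcase]
    simp [startsN, hlen, hcase]
  | cons z zs =>
    have hscons : startsN s = 0 :: (startsN (zs.dropWhile (· == z))).map (· + ((zs.takeWhile (· == z)).length + 1)) := by
      rw [hcase]; exact startsN_cons z zs
    set ss := (startsN (zs.dropWhile (· == z))).map (· + ((zs.takeWhile (· == z)).length + 1)) with hss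
    have hsegsS : segsOf s = ((0 :: ss).zip (ss ++ [s.length])).map
        (fun se => ((se.1 : Int), (se.2 : Int) - 1, s.getD se.1 0)) := by
      unfold segsOf
      rw [hscons, List.drop_succ_cons, List.drop_zero]
    rw [← hcase, hsegsS]
    unfold segsOf
    rw [startsN_cons, ← ht, ← hs, hscons]
    simp only [List.map_cons, List.drop_succ_cons, List.drop_zero, List.cons_append]
    rw [hlen]
    have hzip : ((0 + (t + 1)) :: ss.map (· + (t + 1))).zip (ss.map (· + (t + 1)) ++ [t + 1 + s.length])
        = ((0 :: ss).zip (ss ++ [s.length])).map (Prod.map (· + (t + 1)) (· + (t + 1))) := by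
      rw [show ((0 + (t + 1)) :: ss.map (· + (t + 1))) = (0 :: ss).map (· + (t + 1)) by simp,
          show (ss.map (· + (t + 1)) ++ [t + 1 + s.length]) = (ss ++ [s.length]).map (· + (t + 1)) by
            simp [Nat.add_comm],
          List.zip_map]
    rw [List.zip_cons_cons, List.map_cons, hzip, List.map_map]
    congr 1
    · simp [Nat.add_comm]
    · rw [List.map_map]
      apply List.map_congr_left
      intro se _
      simp only [Function.comp, Prod.map]
      rw [hval se.1]
      push_cast
      refine congrArg₂ _ (by ring) (congrArg₂ _ (by ring) rfl)

-- the canonical run-by-run form is segsOf shifted by idx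
lemma groups_eq_segsOf (xs : List Int) (idx : Int) :
    segmentsGroups xs idx = (segsOf xs).map (fun z => (idx + z.1, idx + z.2.1, z.2.2)) := by
  cases xs with
  | nil => simp [segmentsGroups, segsOf, startsN]
  | cons y ys =>
    rw [segmentsGroups, segsOf_cons, List.map_cons, List.map_map]
    rw [groups_eq_segsOf (ys.dropWhile (· == y)) (idx + (1 + (ys.takeWhile (· == y)).length))]
    congr 1
    · refine congrArg₂ _ (by ring) (congrArg₂ _ (by push_cast; ring) rfl)
    · apply List.map_congr_left
      intro z _
      simp only [Function.comp]
      refine congrArg₂ _ (by ring) (congrArg₂ _ (by ring) rfl)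
termination_by xs.length
decreasing_by
  simp only [List.length_cons]
  exact Nat.lt_succ_of_le (List.length_dropWhile_le _ _)

-- ===== VERDICT (by name: the statement is the Claim_ definition above) =====
theorem segments_from_labels_spec : Claim_equal_segments_from_labels := by
  intro labels _
  unfold Spec_segments_from_labels
  rw [A_eq_groups, alt_eq_segsOf, groups_eq_segsOf]
  simp
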